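-- pv_equiv track=rewrite | github.com/NikitaFir/Leetcode | Distance Between Bus Stops.py | distanceBetweenBusStops
-- ===== SOURCE A (Python) =====
-- def distanceBetweenBusStops(distance, start, destination):
--
--     clockwise = 0
--
--     if start < destination:
--         for i in range(start,destination):
--             clockwise += distance[i]
--
--     elif start == destination:
--         return distance[start]
--     else:
--         for i in range(destination,start):
--             clockwise += distance[i]
--
--     counterclockwise = sum(distance) - clockwise
--
--     return min(clockwise, counterclockwise)
-- ===== SOURCE B (Python) =====
-- def distanceBetweenBusStops(distance, start, destination):
--     n = len(distance)
--     k = (destination - start) % n  # stops passed going clockwise from start to destination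
--     forward = 0
--     i = start
--     for _ in range(k):
--         forward += distance[i]
--         i = (i + 1) % n
--     backward = 0
--     i = destination
--     for _ in range(n - k):
--         backward += distance[i]
--         i = (i + 1) % n
--     return min(forward, backward)
-- ===== Notes on version B (the rewrite author's own statement) =====
-- stated objective: alternative
-- what changed: A sums one directed segment with an index loop and derives the other direction as sum(distance) minus that segment; B instead makes two bounded circular walks with a moving position pointer - start to destination and destination back to start - and returns the shorter walk, so sum(distance) and the subtraction disappear; Pre_ additionally excludes label pairs containing the one-past-the-end stop len(distance) or anything beyond, where A can still return because its range never reads that index while B's walks index the raw labels and raise IndexError.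
-- intended difference: On degenerate label pairs - equal stops, where A returns distance[start] (the edge leaving the stop) while B returns the shorter of an empty walk and a full lap (0 for a nonnegative total; stops where the two readings coincide are left outside D_), and labels more than len(distance) apart (reachable only via a negative label), where A's summed arc wraps past the full circle and double-counts edges - B returns the minimum of two genuine one-lap walks, the intended value. — e.g. on distanceBetweenBusStops([5, 10], 0, 0): A returns 5, B returns 0
-- outside the precondition, e.g. on distanceBetweenBusStops([1, 2], 2, 1): A returns 1, B raises IndexError
import Mathlib
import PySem

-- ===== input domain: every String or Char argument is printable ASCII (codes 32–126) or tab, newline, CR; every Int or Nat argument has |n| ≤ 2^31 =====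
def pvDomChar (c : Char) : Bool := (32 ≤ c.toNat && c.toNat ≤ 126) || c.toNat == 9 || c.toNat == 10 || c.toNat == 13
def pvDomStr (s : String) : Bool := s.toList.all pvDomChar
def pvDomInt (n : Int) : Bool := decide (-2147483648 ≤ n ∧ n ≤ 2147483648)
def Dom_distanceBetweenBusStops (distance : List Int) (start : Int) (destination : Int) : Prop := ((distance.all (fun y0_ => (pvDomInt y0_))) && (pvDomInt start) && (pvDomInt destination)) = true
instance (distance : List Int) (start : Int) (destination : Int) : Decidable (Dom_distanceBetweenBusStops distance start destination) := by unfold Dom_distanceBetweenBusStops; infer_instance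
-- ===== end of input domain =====

-- B walks the circle twice in bounded loops — start→destination and destination→start, each with a
-- moving position pointer — and returns the shorter walk, instead of A's segment-sum loop plus
-- sum(distance)-minus-segment subtraction (objective: alternative); on degenerate label pairs B
-- differs from A (see D_ below), and Pre_ excludes the one-past-the-end label (see Pre_).

-- ===== PORT A =====
-- distance[i] raises IndexError out of range; pyGetD's default 0 is never reached inside Pre_.
def distanceBetweenBusStops (distance : List Int) (start : Int) (destination : Int) : Int :=
  if start < destination then
    let clockwise := (PySem.List.pyRange start destination 1).foldl
      (fun c i => c + PySem.List.pyGetD distance i 0) 0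
    min clockwise (distance.sum - clockwise)
  else if start = destination then
    PySem.List.pyGetD distance start 0
  else
    let clockwise := (PySem.List.pyRange destination start 1).foldl
      (fun c i => c + PySem.List.pyGetD distance i 0) 0
    min clockwise (distance.sum - clockwise)

-- ===== PORT B =====
def distanceBetweenBusStops_alt (distance : List Int) (start : Int) (destination : Int) : Int :=
  let n := PySem.List.len distance
  let k := PySem.Int.mod (destination - start) n
  let f := (PySem.List.pyRange 0 k 1).foldl
    (fun (acc : Int × Int) _ =>
      (acc.1 + PySem.List.pyGetD distance acc.2 0, PySem.Int.mod (acc.2 + 1) n))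
    (0, start)
  let forward := f.1
  let b := (PySem.List.pyRange 0 (n - k) 1).foldl
    (fun (acc : Int × Int) _ =>
      (acc.1 + PySem.List.pyGetD distance acc.2 0, PySem.Int.mod (acc.2 + 1) n))
    (0, destination)
  let backward := b.1
  min forward backward

-- ===== PRECONDITION & SPEC =====
-- Pre_ excludes, besides the inputs where A raises IndexError, the inputs whose labels include the
-- one-past-the-end stop len(distance) (or anything beyond): A can still return there because its
-- range never reads that index, while B's walks index the raw labels themselves and raise.
def Pre_distanceBetweenBusStops (distance : List Int) (start : Int) (destination : Int) : Prop :=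
  -(distance.length : Int) ≤ start ∧ start < distance.length ∧
  -(distance.length : Int) ≤ destination ∧ destination < distance.length
instance (distance : List Int) (start : Int) (destination : Int) : Decidable (Pre_distanceBetweenBusStops distance start destination) := by unfold Pre_distanceBetweenBusStops; infer_instance
def pvWitness_distanceBetweenBusStops : List Int × Int × Int := ([1, 2, 3], 0, 1)

-- On degenerate label pairs — equal stops, where A returns distance[start] (the edge leaving the
-- stop) while B returns the shorter of an empty walk and a full lap (0 for a nonnegative total;
-- stops where the two readings coincide are left outside D_), and labels more than len(distance)
-- apart (reachable only via a negative label), where A's summed arc wraps past the full circle and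
-- double-counts edges — B returns the minimum of two genuine one-lap walks, the intended value.
def D_distanceBetweenBusStops (distance : List Int) (start : Int) (destination : Int) : Prop :=
  (start = destination ∧
    ¬ (PySem.List.pyGet? distance start = some 0 ∧ 0 ≤ distance.sum)) ∨
  destination - start > (distance.length : Int) ∨ start - destination > (distance.length : Int)
instance (distance : List Int) (start : Int) (destination : Int) : Decidable (D_distanceBetweenBusStops distance start destination) := by unfold D_distanceBetweenBusStops; infer_instance

def Spec_distanceBetweenBusStops (distance : List Int) (start : Int) (destination : Int) (out : Int) : Prop := ¬ D_distanceBetweenBusStops distance start destination → out = distanceBetweenBusStops_alt distance start destination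
instance (distance : List Int) (start : Int) (destination : Int) (out : Int) : Decidable (Spec_distanceBetweenBusStops distance start destination out) := by unfold Spec_distanceBetweenBusStops; infer_instance

def pvDiffWitness_distanceBetweenBusStops : List Int × Int × Int := ([5, 10], 0, 0)
def pvDiffWitnessOut_distanceBetweenBusStops : Int × Int := (5, 0)

-- ===== CLAIM (what is proved, stated in full; the proofs are below) =====
def Claim_unchanged_distanceBetweenBusStops : Prop := ∀ (distance : List Int) (start : Int) (destination : Int), Dom_distanceBetweenBusStops distance start destination → Pre_distanceBetweenBusStops distance start destination → Spec_distanceBetweenBusStops distance start destination (distanceBetweenBusStops distance start destination)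
def Claim_changed_distanceBetweenBusStops : Prop := Dom_distanceBetweenBusStops (pvDiffWitness_distanceBetweenBusStops.1) (pvDiffWitness_distanceBetweenBusStops.2.1) (pvDiffWitness_distanceBetweenBusStops.2.2) ∧ Pre_distanceBetweenBusStops (pvDiffWitness_distanceBetweenBusStops.1) (pvDiffWitness_distanceBetweenBusStops.2.1) (pvDiffWitness_distanceBetweenBusStops.2.2) ∧ D_distanceBetweenBusStops (pvDiffWitness_distanceBetweenBusStops.1) (pvDiffWitness_distanceBetweenBusStops.2.1) (pvDiffWitness_distanceBetweenBusStops.2.2) ∧ distanceBetweenBusStops (pvDiffWitness_distanceBetweenBusStops.1) (pvDiffWitness_distanceBetweenBusStops.2.1) (pvDiffWitness_distanceBetweenBusStops.2.2) = pvDiffWitnessOut_distanceBetweenBusStops.1 ∧ distanceBetweenBusStops_alt (pvDiffWitness_distanceBetweenBusStops.1) (pvDiffWitness_distanceBetweenBusStops.2.1) (pvDiffWitness_distanceBetweenBusStops.2.2) = pvDiffWitnessOut_distanceBetweenBusStops.2 ∧ pvDiffWitnessOut_distanceBetweenBusStops.1 ≠ pvDiffWitnessOut_distanceBetweenBusSt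ops.2

-- ===== LEMMAS AND PROOFS =====

-- segment sum Σ_{j ∈ [a,b)} distance[j] under Python indexing
def pvSeg (xs : List Int) (a b : Int) : Int :=
  ((PySem.List.pyRange a b 1).map (fun j => PySem.List.pyGetD xs j 0)).sum

-- A's clockwise fold is the segment sum
theorem pvAFold (xs : List Int) (a b : Int) :
    (PySem.List.pyRange a b 1).foldl (fun c i => c + PySem.List.pyGetD xs i 0) 0
    = pvSeg xs a b := by
  rw [PySem.List.foldl_add]
  simp [pvSeg]

theorem pvSeg_append (xs : List Int) (a m b : Int) (h1 : a ≤ m) (h2 : m ≤ b) :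
    pvSeg xs a b = pvSeg xs a m + pvSeg xs m b := by
  unfold pvSeg
  rw [PySem.List.pyRange_one_append a m b h1 h2, List.map_append, List.sum_append]

theorem pvSeg_total (xs : List Int) : pvSeg xs 0 (xs.length : Int) = xs.sum := by
  unfold pvSeg
  have h := PySem.List.map_pyGetD_pyRange_zero xs 0
  rw [PySem.List.len_eq] at h
  rw [h]

theorem pvGet_wrap (xs : List Int) {i : Int} (h1 : -(xs.length : Int) ≤ i) (h2 : i < 0) :
    PySem.List.pyGetD xs i 0 = PySem.List.pyGetD xs (i + xs.length) 0 := by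
  obtain ⟨k, hk1, hk2, hk3⟩ : ∃ k : Nat, i = -(k : Int) ∧ 0 < k ∧ k ≤ xs.length :=
    ⟨(-i).toNat, by omega, by omega, by omega⟩
  have e1 : PySem.List.pyGet? xs i = xs[xs.length - k]? := by
    rw [hk1]; exact PySem.List.pyGet?_neg_natCast xs k hk2 hk3
  have e2 : PySem.List.pyGet? xs (i + xs.length) = xs[(i + (xs.length : Int)).toNat]? :=
    PySem.List.pyGet?_of_nonneg xs (by omega)
  have e3 : xs.length - k = (i + (xs.length : Int)).toNat := by omega
  simp [PySem.List.pyGetD, e1, e2, e3]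

theorem pvSeg_wrap (xs : List Int) {u v : Int} (h1 : -(xs.length : Int) ≤ u) (huv : u ≤ v)
    (hv : v ≤ 0) :
    pvSeg xs u v = pvSeg xs (u + xs.length) (v + xs.length) := by
  unfold pvSeg
  rw [PySem.List.pyRange_one u v, PySem.List.pyRange_one (u + xs.length) (v + xs.length)]
  have hlen : ((v + (xs.length : Int)) - (u + (xs.length : Int))).toNat = (v - u).toNat := by omega
  rw [hlen, List.map_map, List.map_map]
  apply congrArg
  apply List.map_congr_left
  intro k hk
  rw [List.mem_range] at hk
  simp only [Function.comp]
  have hb : (k : Int) < v - u := by omega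
  rw [pvGet_wrap xs (i := u + (k : Int)) (by omega) (by omega)]
  congr 1
  omega

theorem pvModSmall {a N : Int} (h0 : 0 ≤ a) (h1 : a < N) : PySem.Int.mod a N = a := by
  rw [PySem.Int.mod_eq_emod_of_pos (by omega)]
  exact Int.emod_eq_of_lt h0 h1

theorem pvModShift {a N : Int} (hN : 0 < N) :
    PySem.Int.mod a N = PySem.Int.mod (a + N) N := by
  rw [PySem.Int.mod_eq_emod_of_pos hN, PySem.Int.mod_eq_emod_of_pos hN]
  conv_lhs => rw [show a = (a + N) + N * (-1) by ring]
  rw [Int.add_mul_emod_self_left]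

-- a modular access inside [-len, len) is the same Python access
theorem pvMod_get (xs : List Int) {i : Int} (h1 : -(xs.length : Int) ≤ i)
    (h2 : i < (xs.length : Int)) :
    PySem.List.pyGetD xs (PySem.Int.mod i (xs.length : Int)) 0 = PySem.List.pyGetD xs i 0 := by
  by_cases h0 : 0 ≤ i
  · rw [pvModSmall h0 h2]
  · have hN : (0 : Int) < (xs.length : Int) := by omega
    rw [pvModShift hN, pvModSmall (by omega) (by omega), ← pvGet_wrap xs h1 (by omega)]

-- B's walk sum: m steps clockwise starting at (possibly negative) label lo
def pvW (xs : List Int) (lo m : Int) : Int :=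
  ((PySem.List.pyRange 0 m 1).map
    (fun step => PySem.List.pyGetD xs (PySem.Int.mod (lo + step) (xs.length : Int)) 0)).sum

theorem pvW_shift (xs : List Int) (lo m : Int) (hN : 0 < (xs.length : Int)) :
    pvW xs lo m = pvW xs (lo + xs.length) m := by
  unfold pvW
  apply congrArg
  apply List.map_congr_left
  intro k _
  rw [pvModShift hN]
  ring_nf

theorem pvW_eq_seg (xs : List Int) {lo m : Int} (h1 : -(xs.length : Int) ≤ lo) (h0 : 0 ≤ m)
    (h2 : lo + m ≤ (xs.length : Int)) :
    pvW xs lo m = pvSeg xs lo (lo + m) := by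
  unfold pvW pvSeg
  rw [PySem.List.pyRange_one 0 m, PySem.List.pyRange_one lo (lo + m)]
  have hlen : ((lo + m) - lo).toNat = (m - 0).toNat := by omega
  rw [hlen, List.map_map, List.map_map]
  apply congrArg
  apply List.map_congr_left
  intro k hk
  rw [List.mem_range] at hk
  simp only [Function.comp]
  have hb : (k : Int) < m := by omega
  have e : (0 : Int) + (k : Int) = (k : Int) := by omega
  rw [e, pvMod_get xs (i := lo + (k : Int)) (by omega) (by omega)]

theorem pvW_split (xs : List Int) (lo : Int) {m1 m : Int} (h0 : 0 ≤ m1) (h1 : m1 ≤ m) :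
    pvW xs lo m = pvW xs lo m1 + pvW xs (lo + m1) (m - m1) := by
  unfold pvW
  rw [PySem.List.pyRange_one_append 0 m1 m h0 h1, List.map_append, List.sum_append]
  congr 1
  rw [PySem.List.pyRange_one m1 m, PySem.List.pyRange_one 0 (m - m1)]
  have hlen : (m - m1).toNat = ((m - m1) - 0).toNat := by omega
  rw [← hlen, List.map_map, List.map_map]
  apply congrArg
  apply List.map_congr_left
  intro k _
  simp only [Function.comp]
  ring_nf

-- the clockwise arc of B's walk equals A's (Python-indexed) segment sum
theorem pvCW (xs : List Int) {lo hi : Int} (h1 : -(xs.length : Int) ≤ lo) (h2 : lo ≤ hi)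
    (h3 : hi ≤ (xs.length : Int)) (h4 : hi - lo ≤ (xs.length : Int)) :
    pvW xs lo (hi - lo) = pvSeg xs lo hi := by
  by_cases hlo : 0 ≤ lo
  · rw [pvW_eq_seg xs h1 (by omega) (by omega)]
    congr 1
    omega
  · have hN : (0 : Int) < (xs.length : Int) := by omega
    rw [pvW_shift xs lo _ hN]
    by_cases hhi : hi ≤ 0
    · rw [pvW_eq_seg xs (by omega) (by omega) (by omega)]
      have e : lo + (xs.length : Int) + (hi - lo) = hi + (xs.length : Int) := by omega
      rw [e, ← pvSeg_wrap xs h1 h2 hhi]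
    · rw [pvW_split xs (lo + xs.length) (m1 := -lo) (by omega) (by omega)]
      have e1 : lo + (xs.length : Int) + -lo = (xs.length : Int) := by omega
      have e2 : hi - lo - -lo = hi := by omega
      rw [e1, e2]
      rw [pvW_eq_seg xs (m := -lo) (by omega) (by omega) (by omega)]
      have e3 : lo + (xs.length : Int) + -lo = (xs.length : Int) := by omega
      rw [e3]
      have e4 : pvW xs (xs.length : Int) hi = pvW xs 0 hi := by
        have := pvW_shift xs 0 hi hN
        simp only [zero_add] at this
        exact this.symm
      rw [e4, pvW_eq_seg xs (lo := 0) (by omega) (by omega) (by omega)]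
      have e5 : (0 : Int) + hi = hi := by omega
      rw [e5]
      rw [pvSeg_append xs lo 0 hi (by omega) (by omega),
          pvSeg_wrap xs (u := lo) (v := 0) h1 (by omega) le_rfl]
      have e6 : (0 : Int) + (xs.length : Int) = (xs.length : Int) := by omega
      rw [e6]

-- one full lap of B's walk sums the whole list
theorem pvFull0 (xs : List Int) {lo : Int} (h0 : 0 ≤ lo) (h1 : lo ≤ (xs.length : Int))
    (hN : 0 < (xs.length : Int)) :
    pvW xs lo (xs.length : Int) = xs.sum := by
  rw [pvW_split xs lo (m1 := (xs.length : Int) - lo) (by omega) (by omega)]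
  have e1 : lo + ((xs.length : Int) - lo) = (xs.length : Int) := by omega
  rw [e1]
  rw [pvW_eq_seg xs (m := (xs.length : Int) - lo) (by omega) (by omega) (by omega), e1]
  have e2 : (xs.length : Int) - ((xs.length : Int) - lo) = lo := by omega
  rw [e2]
  have e4 : pvW xs (xs.length : Int) lo = pvW xs 0 lo := by
    have := pvW_shift xs 0 lo hN
    simp only [zero_add] at this
    exact this.symm
  rw [e4, pvW_eq_seg xs (lo := 0) (by omega) h0 (by omega)]
  have e5 : (0 : Int) + lo = lo := by omega
  rw [e5]
  have := pvSeg_append xs 0 lo (xs.length : Int) h0 h1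
  rw [pvSeg_total] at this
  omega

theorem pvFull (xs : List Int) {lo : Int} (h0 : -(xs.length : Int) ≤ lo)
    (h1 : lo ≤ (xs.length : Int)) (hN : 0 < (xs.length : Int)) :
    pvW xs lo (xs.length : Int) = xs.sum := by
  by_cases hlo : 0 ≤ lo
  · exact pvFull0 xs hlo h1 hN
  · rw [pvW_shift xs lo _ hN]
    exact pvFull0 xs (by omega) (by omega) hN

-- Python integer mod by a positive modulus lands in [0, N)
theorem pvModBounds {a N : Int} (hN : 0 < N) :
    0 ≤ PySem.Int.mod a N ∧ PySem.Int.mod a N < N := by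
  rw [PySem.Int.mod_eq_emod_of_pos hN]
  exact ⟨Int.emod_nonneg a (by omega), Int.emod_lt_of_pos a hN⟩

theorem pvModAdd {x y N : Int} (hN : 0 < N) :
    PySem.Int.mod (x + y) N = PySem.Int.mod (PySem.Int.mod x N + y) N := by
  rw [PySem.Int.mod_eq_emod_of_pos hN, PySem.Int.mod_eq_emod_of_pos hN,
      PySem.Int.mod_eq_emod_of_pos hN]
  conv_lhs => rw [show x + y = x % N + y + N * (x / N) from by
    have := Int.mul_ediv_add_emod x N; linarith]
  rw [Int.add_mul_emod_self_left]

theorem pvW_congr_mod (xs : List Int) {a b : Int} (m : Int)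
    (hN : 0 < (xs.length : Int))
    (h : PySem.Int.mod a (xs.length : Int) = PySem.Int.mod b (xs.length : Int)) :
    pvW xs a m = pvW xs b m := by
  unfold pvW
  apply congrArg
  apply List.map_congr_left
  intro k _
  have e : PySem.Int.mod (a + k) (xs.length : Int) = PySem.Int.mod (b + k) (xs.length : Int) := by
    rw [pvModAdd hN, h, ← pvModAdd hN]
  rw [e]

-- Nat-indexed walk sum (the value accumulated by m steps of B's pointer walk from label i)
def pvS (xs : List Int) (i : Int) (m : Nat) : Int :=
  ((List.range m).map
    (fun (st : Nat) => PySem.List.pyGetD xs (PySem.Int.mod (i + (st : Int)) (xs.length : Int)) 0)).sum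

theorem pvS_congr_mod (xs : List Int) {a b : Int} (m : Nat)
    (hN : 0 < (xs.length : Int))
    (h : PySem.Int.mod a (xs.length : Int) = PySem.Int.mod b (xs.length : Int)) :
    pvS xs a m = pvS xs b m := by
  unfold pvS
  apply congrArg
  apply List.map_congr_left
  intro k _
  have e : PySem.Int.mod (a + (k : Int)) (xs.length : Int)
      = PySem.Int.mod (b + (k : Int)) (xs.length : Int) := by
    rw [pvModAdd hN, h, ← pvModAdd hN]
  rw [e]

theorem pvS_succ (xs : List Int) (i : Int) (m : Nat) :
    pvS xs i (m + 1)
      = PySem.List.pyGetD xs (PySem.Int.mod i (xs.length : Int)) 0 + pvS xs (i + 1) m := by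
  unfold pvS
  rw [List.range_succ_eq_map, List.map_cons, List.sum_cons, List.map_map]
  congr 1
  · congr 2
    simp
  · apply congrArg
    apply List.map_congr_left
    intro k _
    simp only [Function.comp]
    congr 2
    push_cast
    ring

-- B's pointer-walk fold: first component is the Nat-indexed walk sum
theorem pvWalkFold (xs : List Int) (l : List Int) :
    ∀ c i : Int, -(xs.length : Int) ≤ i → i < (xs.length : Int) →
    (l.foldl
      (fun (acc : Int × Int) _ =>
        (acc.1 + PySem.List.pyGetD xs acc.2 0, PySem.Int.mod (acc.2 + 1) (xs.length : Int)))
      (c, i)).1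
      = c + pvS xs i l.length := by
  induction l with
  | nil => intro c i _ _; simp [pvS]
  | cons x tl ih =>
    intro c i h1 h2
    have hN : (0 : Int) < (xs.length : Int) := by omega
    obtain ⟨hm0, hm1⟩ := pvModBounds (a := i + 1) hN
    simp only [List.foldl_cons, List.length_cons]
    rw [ih (c + PySem.List.pyGetD xs i 0) (PySem.Int.mod (i + 1) (xs.length : Int))
        (by omega) hm1]
    rw [pvS_succ xs i tl.length]
    rw [pvMod_get xs h1 h2]
    have e : pvS xs (PySem.Int.mod (i + 1) (xs.length : Int)) tl.length
        = pvS xs (i + 1) tl.length := by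
      apply pvS_congr_mod xs tl.length hN
      rw [PySem.Int.mod_eq_emod_of_pos hN, PySem.Int.mod_eq_emod_of_pos hN, Int.emod_emod_of_dvd]
      exact dvd_refl _
    rw [e]
    ring

-- the Int-indexed walk sum is the Nat-indexed one
theorem pvW_eq_pvS (xs : List Int) (lo m : Int) : pvW xs lo m = pvS xs lo m.toNat := by
  unfold pvW pvS
  rw [PySem.List.pyRange_one 0 m]
  have e : (m - 0).toNat = m.toNat := by omega
  rw [e, List.map_map]
  apply congrArg
  apply List.map_congr_left
  intro k _
  simp only [Function.comp]
  congr 2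
  ring

-- B (start ≠ destination, labels strictly inside [-len, len)) = min (A's segment sum) (total − it)
theorem pvAltEq (xs : List Int) (s t : Int) (hne : ¬ s = t)
    (h1 : -(xs.length : Int) ≤ s) (h2 : s < (xs.length : Int))
    (h3 : -(xs.length : Int) ≤ t) (h4 : t < (xs.length : Int))
    (h5 : t - s ≤ (xs.length : Int)) (h6 : s - t ≤ (xs.length : Int)) :
    distanceBetweenBusStops_alt xs s t
      = min (pvSeg xs (min s t) (max s t))
            (xs.sum - pvSeg xs (min s t) (max s t)) := by
  have hN : (0 : Int) < (xs.length : Int) := by omega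
  obtain ⟨hk0, hkn⟩ := pvModBounds (a := t - s) hN
  simp only [distanceBetweenBusStops_alt, PySem.List.len_eq]
  set k := PySem.Int.mod (t - s) (xs.length : Int) with hkdef
  rw [pvWalkFold xs (PySem.List.pyRange 0 k 1) 0 s h1 h2,
      pvWalkFold xs (PySem.List.pyRange 0 ((xs.length : Int) - k) 1) 0 t h3 h4,
      PySem.List.length_pyRange_one, PySem.List.length_pyRange_one]
  have e1 : (k - 0).toNat = k.toNat := by omega
  have e2 : ((xs.length : Int) - k - 0).toNat = ((xs.length : Int) - k).toNat := by omega
  rw [e1, e2, ← pvW_eq_pvS, ← pvW_eq_pvS]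
  have hB : pvW xs t ((xs.length : Int) - k) = xs.sum - pvW xs s k := by
    have hcongr : pvW xs t ((xs.length : Int) - k) = pvW xs (s + k) ((xs.length : Int) - k) := by
      apply pvW_congr_mod xs _ hN
      rw [hkdef]
      conv_rhs => rw [add_comm s (PySem.Int.mod (t - s) (xs.length : Int)),
        ← pvModAdd (x := t - s) (y := s) hN]
      congr 1
      ring
    have hsplit := pvW_split xs s (m1 := k) (m := (xs.length : Int)) hk0 (by omega)
    rw [pvFull xs h1 (by omega) hN] at hsplit
    omega
  rw [hB]
  rcases lt_or_gt_of_ne (show s ≠ t from hne) with hlt | hgt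
  · have hmin : min s t = s := min_eq_left (le_of_lt hlt)
    have hmax : max s t = t := max_eq_right (le_of_lt hlt)
    rw [hmin, hmax]
    rcases lt_or_ge (t - s) (xs.length : Int) with hd | hd
    · have hk : k = t - s := by rw [hkdef, pvModSmall (by omega) hd]
      have hcw : pvW xs s k = pvSeg xs s t := by
        rw [hk]
        have := pvCW xs (lo := s) (hi := t) h1 (by omega) (by omega) (by omega)
        exact this
      rw [hcw]
      simp
    · have hdn : t - s = (xs.length : Int) := by omega
      have hk : k = 0 := by
        rw [hkdef, hdn, PySem.Int.mod_eq_emod_of_pos hN, Int.emod_self]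
      have hzero : pvW xs s k = 0 := by
        rw [hk]; unfold pvW; rw [PySem.List.pyRange_one_eq_nil le_rfl]; simp
      have hseg : pvSeg xs s t = xs.sum := by
        have hc := pvCW xs (lo := s) (hi := t) h1 (by omega) (by omega) (by omega)
        rw [hdn] at hc
        rw [← hc]
        exact pvFull xs h1 (by omega) hN
      rw [hzero, hseg]
      simp [min_comm]
  · have hmin : min s t = t := min_eq_right (le_of_lt hgt)
    have hmax : max s t = s := max_eq_left (le_of_lt hgt)
    rw [hmin, hmax]
    have hk : k = t - s + (xs.length : Int) := by
      rw [hkdef, pvModShift hN, pvModSmall (by omega) (by omega)]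
    have hcw : pvW xs s k = xs.sum - pvSeg xs t s := by
      have hsp := pvW_split xs s (m1 := k) (m := (xs.length : Int)) hk0 (by omega)
      rw [pvFull xs h1 (by omega) hN] at hsp
      have e3 : s + k = t + (xs.length : Int) := by rw [hk]; ring
      have e4 : (xs.length : Int) - k = s - t := by rw [hk]; ring
      rw [e3, e4] at hsp
      have e5 : pvW xs (t + (xs.length : Int)) (s - t) = pvW xs t (s - t) :=
        (pvW_shift xs t (s - t) hN).symm
      have e6 : pvW xs t (s - t) = pvSeg xs t s := by
        have := pvCW xs (lo := t) (hi := s) h3 (by omega) (by omega) (by omega)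
        exact this
      rw [e5, e6] at hsp
      omega
    rw [hcw]
    have e7 : xs.sum - (xs.sum - pvSeg xs t s) = pvSeg xs t s := by omega
    rw [e7]
    simp [min_comm]

-- ===== VERDICT (by name: the statement is the Claim_ definition above) =====
theorem distanceBetweenBusStops_spec : Claim_unchanged_distanceBetweenBusStops := by
  intro distance start destination _ hPre hnD
  obtain ⟨h1, h2, h3, h4⟩ := hPre
  simp only [D_distanceBetweenBusStops, not_or] at hnD
  obtain ⟨hD1, hD2, hD3⟩ := hnD
  by_cases heq : start = destination
  · have h0 : PySem.List.pyGet? distance start = some 0 ∧ 0 ≤ distance.sum := by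
      rcases not_and_or.mp hD1 with h | h
      · exact absurd heq h
      · exact not_not.mp h
    subst heq
    have hN : (0 : Int) < (distance.length : Int) := by omega
    have hA : distanceBetweenBusStops distance start start = 0 := by
      simp only [distanceBetweenBusStops, lt_irrefl, ite_false, ite_true]
      simp [PySem.List.pyGetD, h0.1]
    have hk : PySem.Int.mod (start - start) (distance.length : Int) = 0 := by
      rw [sub_self, PySem.Int.mod_eq_emod_of_pos hN, Int.zero_emod]
    have hB : distanceBetweenBusStops_alt distance start start = 0 := by
      simp only [distanceBetweenBusStops_alt, PySem.List.len_eq, hk]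
      rw [pvWalkFold distance (PySem.List.pyRange 0 0 1) 0 start h1 h2,
          pvWalkFold distance (PySem.List.pyRange 0 ((distance.length : Int) - 0) 1) 0 start h1 h2,
          PySem.List.length_pyRange_one, PySem.List.length_pyRange_one]
      have e1 : (((0 : Int)) - 0).toNat = (0 : Int).toNat := by omega
      have e2 : ((distance.length : Int) - 0 - 0).toNat = ((distance.length : Int)).toNat := by
        omega
      rw [e1, e2, ← pvW_eq_pvS, ← pvW_eq_pvS]
      have ez : pvW distance start 0 = 0 := by
        unfold pvW; rw [PySem.List.pyRange_one_eq_nil le_rfl]; simp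
      rw [ez, pvFull distance h1 (by omega) hN]
      simpa using min_eq_left h0.2
    rw [hA, hB]
  · rw [pvAltEq distance start destination heq h1 h2 h3 h4 (by omega) (by omega)]
    rcases lt_or_gt_of_ne (show start ≠ destination from heq) with hlt | hgt
    · have hmin : min start destination = start := min_eq_left (le_of_lt hlt)
      have hmax : max start destination = destination := max_eq_right (le_of_lt hlt)
      rw [hmin, hmax]
      simp only [distanceBetweenBusStops, if_pos hlt, pvAFold]
    · have hmin : min start destination = destination := min_eq_right (le_of_lt hgt)
      have hmax : max start destination = start := max_eq_left (le_of_lt hgt)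
      rw [hmin, hmax]
      simp only [distanceBetweenBusStops, if_neg (show ¬ start < destination by omega),
        if_neg (show ¬ start = destination by omega), pvAFold]

theorem distanceBetweenBusStops_changed : Claim_changed_distanceBetweenBusStops := by
  unfold Claim_changed_distanceBetweenBusStops; decide
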